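-- pv_equiv track=rewrite | github.com/iivalchev/cerbero | cerbero/packages/wix.py | _format_id
-- ===== SOURCE A (Python) =====
-- def _format_id(string, replace_dots=False):
--     ret = string
--     ret = ret.replace('_', '__')
--     for r in ['/', '-', ' ', '@', '+']:
--         ret = ret.replace(r, '_')
--     if replace_dots:
--         ret = ret.replace('.', '')
--     # For directories starting with a number
--     return '_' + ret
-- ===== SOURCE B (Python) =====
-- def _format_id(string, replace_dots=False):
--     def tr(c):
--         if c == '_':
--             return '__'
--         if c in '/- @+':
--             return '_'
--         if c == '.' and replace_dots:
--             return ''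
--         return c
--     return '_' + ''.join(tr(c) for c in string)
-- ===== Notes on version B (the rewrite author's own statement) =====
-- stated objective: alternative
-- what changed: Six successive str.replace passes (each rebuilding the whole string) are replaced by one single traversal that translates each character and joins the pieces once; same asymptotic cost, and in CPython the C-level replaces are faster in practice.
import Mathlib
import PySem

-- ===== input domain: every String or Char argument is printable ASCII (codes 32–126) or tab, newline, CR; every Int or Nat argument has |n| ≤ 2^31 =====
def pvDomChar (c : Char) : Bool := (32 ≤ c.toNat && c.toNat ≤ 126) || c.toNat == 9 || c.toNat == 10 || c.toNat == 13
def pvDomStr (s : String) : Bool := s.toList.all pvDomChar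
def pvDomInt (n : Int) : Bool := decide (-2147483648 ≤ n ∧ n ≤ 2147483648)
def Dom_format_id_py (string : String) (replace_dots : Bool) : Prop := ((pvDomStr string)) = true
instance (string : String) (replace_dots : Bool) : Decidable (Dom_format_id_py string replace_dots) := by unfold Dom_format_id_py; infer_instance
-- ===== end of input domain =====

-- B replaces A's six successive str.replace passes by one single character-translating traversal (alternative decomposition, same asymptotic cost).

-- ===== PORT A =====
def format_id_py (string : String) (replace_dots : Bool) : String :=
  let ret := string
  let ret := PySem.Str.replace ret "_" "__"
  let ret := ["/", "-", " ", "@", "+"].foldl (fun r s => PySem.Str.replace r s "_") ret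
  let ret := if replace_dots then PySem.Str.replace ret "." "" else ret
  "_" ++ ret

-- ===== PORT B =====
def fidTr (replace_dots : Bool) (c : Char) : List Char :=
  if c = '_' then ['_', '_']
  else if c = '/' ∨ c = '-' ∨ c = ' ' ∨ c = '@' ∨ c = '+' then ['_']
  else if c = '.' ∧ replace_dots then []
  else [c]

def format_id_py_alt (string : String) (replace_dots : Bool) : String :=
  String.ofList ('_' :: string.toList.flatMap (fidTr replace_dots))

-- ===== PRECONDITION & SPEC =====
def Spec_format_id_py (string : String) (replace_dots : Bool) (out : String) : Prop := out = format_id_py_alt string replace_dots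
instance (string : String) (replace_dots : Bool) (out : String) : Decidable (Spec_format_id_py string replace_dots out) := by unfold Spec_format_id_py; infer_instance

-- ===== CLAIM (what is proved, stated in full; the proofs are below) =====
def Claim_equal_format_id_py : Prop := ∀ (string : String) (replace_dots : Bool), Dom_format_id_py string replace_dots → Spec_format_id_py string replace_dots (format_id_py string replace_dots)

-- ===== LEMMAS AND PROOFS =====

-- replace with a one-character pattern is a per-character flatMap
theorem replace_go_single (o : Char) (new : List Char) :
    ∀ (fuel : Nat) (l acc : List Char), l.length ≤ fuel →
      PySem.Chars.replace.go [o] new fuel l acc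
        = acc.reverse ++ l.flatMap (fun c => if c = o then new else [c]) := by
  intro fuel
  induction fuel with
  | zero =>
    intro l acc h
    have : l = [] := List.eq_nil_of_length_eq_zero (Nat.le_zero.mp h)
    subst this
    simp [PySem.Chars.replace.go]
  | succ n ih =>
    intro l acc h
    cases l with
    | nil => simp [PySem.Chars.replace.go]
    | cons c t =>
      by_cases hc : c = o
      · subst hc
        have hp : List.isPrefixOf [c] (c :: t) = true := by
          simp [List.isPrefixOf]
        simp only [PySem.Chars.replace.go, hp, if_pos]
        rw [ih]
        · simp
        · simpa using Nat.le_of_succ_le_succ h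
      · have hp : List.isPrefixOf [o] (c :: t) = false := by
          simp [List.isPrefixOf]
          exact fun he => absurd he.symm hc
        simp only [PySem.Chars.replace.go, hp]
        rw [if_neg (by simp), ih]
        · simp [hc]
        · simpa using Nat.le_of_succ_le_succ h

theorem replace_single (s : List Char) (o : Char) (new : List Char) :
    PySem.Chars.replace s [o] new = s.flatMap (fun c => if c = o then new else [c]) := by
  have he : ([o] : List Char).isEmpty = false := rfl
  unfold PySem.Chars.replace
  rw [he]
  exact replace_go_single o new s.length s [] (le_refl _)

theorem format_id_py_spec : Claim_equal_format_id_py := by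
  intro s rd _
  unfold Spec_format_id_py format_id_py format_id_py_alt
  rw [← String.toList_inj]
  cases rd <;>
  · simp only [List.foldl, if_true, if_false, Bool.false_eq_true, String.toList_append,
      PySem.Str.toList_replace]
    have hu : ("_" : String).toList = ['_'] := rfl
    have hs : ("/" : String).toList = ['/'] := rfl
    have hd : ("-" : String).toList = ['-'] := rfl
    have hsp : (" " : String).toList = [' '] := rfl
    have hat : ("@" : String).toList = ['@'] := rfl
    have hpl : ("+" : String).toList = ['+'] := rfl
    have hdot : ("." : String).toList = ['.'] := rfl
    have huu : ("__" : String).toList = ['_', '_'] := rfl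
    have hem : ("" : String).toList = [] := rfl
    simp only [hu, hs, hd, hsp, hat, hpl, hdot, huu, hem, String.toList_ofList,
      replace_single, List.flatMap_assoc]
    refine congrArg (fun x => '_' :: x) ?_
    refine List.flatMap_congr ?_
    intro c _
    by_cases h1 : c = '_' <;> by_cases h2 : c = '/' <;> by_cases h3 : c = '-' <;>
      by_cases h4 : c = ' ' <;> by_cases h5 : c = '@' <;> by_cases h6 : c = '+' <;>
      by_cases h7 : c = '.' <;>
      simp_all [fidTr]
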